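-- pv_equiv track=rewrite | github.com/isamwata/-moot-court-ai | case_arguer.py | find_relevant_precedents
-- ===== SOURCE A (Python) =====
-- def find_relevant_precedents(facts, precedents, top_k=3):
--     """Find relevant precedents based on keywords"""
--     # Simple keyword matching
--     keywords = ["dismissal", "unfair", "employment", "termination", "misconduct", "procedural", "substantive"]
--
--     relevant = []
--     for precedent in precedents:
--         text = precedent.get("text", "").lower()
--         score = sum(1 for keyword in keywords if keyword in text)
--         if score > 0:
--             relevant.append((precedent, score))
--
--     # Sort by relevance and return top_k
--     relevant.sort(key=lambda x: x[1], reverse=True)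
--     return [item[0] for item in relevant[:top_k]]
-- ===== SOURCE B (Python) =====
-- def find_relevant_precedents(facts, precedents, top_k=3):
--     """Find relevant precedents based on keywords (bucket ranking, no sort)"""
--     keywords = ["dismissal", "unfair", "employment", "termination", "misconduct", "procedural", "substantive"]
--
--     # one pass: drop each matching precedent into the bucket of its score (1..7)
--     buckets = {}
--     for precedent in precedents:
--         text = precedent.get("text", "").lower()
--         score = sum(1 for keyword in keywords if keyword in text)
--         if score > 0:
--             buckets.setdefault(score, []).append(precedent)
--
--     # emit buckets from highest score down: a stable descending order
--     ranked = []
--     for s in range(7, 0, -1):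
--         ranked += buckets.get(s, [])
--     return ranked[:top_k]
-- ===== Notes on version B (the rewrite author's own statement) =====
-- stated objective: alternative
-- what changed: Replaces collect-pairs-then-stable-sort with a single-pass bucketing by score (1..7) and emits buckets from highest score down, which reproduces the stable descending order without any sort.
import Mathlib
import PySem

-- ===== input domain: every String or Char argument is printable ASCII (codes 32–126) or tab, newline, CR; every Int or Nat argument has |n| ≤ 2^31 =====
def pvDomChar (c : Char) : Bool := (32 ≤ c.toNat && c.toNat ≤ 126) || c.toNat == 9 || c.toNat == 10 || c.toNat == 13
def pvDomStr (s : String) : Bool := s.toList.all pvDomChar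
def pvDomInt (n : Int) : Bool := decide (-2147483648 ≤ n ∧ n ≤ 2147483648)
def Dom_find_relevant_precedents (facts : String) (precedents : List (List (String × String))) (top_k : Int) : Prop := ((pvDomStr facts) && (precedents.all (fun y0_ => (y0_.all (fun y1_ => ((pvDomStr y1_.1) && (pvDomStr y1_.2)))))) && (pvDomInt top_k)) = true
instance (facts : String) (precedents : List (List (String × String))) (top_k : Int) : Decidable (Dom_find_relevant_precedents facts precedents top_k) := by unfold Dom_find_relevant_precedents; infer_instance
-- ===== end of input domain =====

-- B replaces A's collect-then-stable-sort with one-pass score buckets (1..7) emitted high-to-low: same result, no sort.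


-- ===== PORT A =====
-- shared by both ports (identical scoring loop in both Pythons)
def pvKeywords : List String := ["dismissal", "unfair", "employment", "termination", "misconduct", "procedural", "substantive"]

-- score = sum(1 for keyword in keywords if keyword in text), text = precedent.get("text","").lower()
def pvScore (p : List (String × String)) : Int :=
  pvKeywords.foldl
    (fun s k => if PySem.Str.isIn k (PySem.Str.lower (PySem.Dict.getD ⟨p⟩ "text" "")) then s + 1 else s) 0

def find_relevant_precedents (facts : String) (precedents : List (List (String × String))) (top_k : Int) : List (List (String × String)) :=
  let relevant := precedents.foldl (fun acc p =>
      let score := pvScore p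
      if score > 0 then acc ++ [(p, score)] else acc) []
  let sortedRel := PySem.List.sorted relevant (fun x => x.2) true
  (PySem.List.slice sortedRel none (some top_k)).map (fun x => x.1)

-- ===== PORT B =====
def find_relevant_precedents_alt (facts : String) (precedents : List (List (String × String))) (top_k : Int) : List (List (String × String)) :=
  let buckets := precedents.foldl (fun d p =>
      let score := pvScore p
      if score > 0 then d.modify score [] (fun l => l ++ [p]) else d)
    (PySem.Dict.empty : PySem.Dict Int (List (List (String × String))))
  let ranked := (PySem.List.pyRange 7 0 (-1)).foldl (fun acc s => acc ++ buckets.getD s []) []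
  PySem.List.slice ranked none (some top_k)

-- ===== PRECONDITION & SPEC =====
def Spec_find_relevant_precedents (facts : String) (precedents : List (List (String × String))) (top_k : Int) (out : List (List (String × String))) : Prop := out = find_relevant_precedents_alt facts precedents top_k
instance (facts : String) (precedents : List (List (String × String))) (top_k : Int) (out : List (List (String × String))) : Decidable (Spec_find_relevant_precedents facts precedents top_k out) := by unfold Spec_find_relevant_precedents; infer_instance

-- ===== CLAIM (what is proved, stated in full; the proofs are below) =====
def Claim_equal_find_relevant_precedents : Prop := ∀ (facts : String) (precedents : List (List (String × String))) (top_k : Int), Dom_find_relevant_precedents facts precedents top_k → Spec_find_relevant_precedents facts precedents top_k (find_relevant_precedents facts precedents top_k)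

-- ===== LEMMAS AND PROOFS =====

-- score bounds: a counting fold over ks adds between 0 and ks.length
theorem pvCountBounds (t : String) (ks : List String) : ∀ s : Int,
    s ≤ ks.foldl (fun a k => if PySem.Str.isIn k t then a + 1 else a) s ∧
    ks.foldl (fun a k => if PySem.Str.isIn k t then a + 1 else a) s ≤ s + ks.length := by
  induction ks with
  | nil => intro s; simp
  | cons k ks ih =>
    intro s
    simp only [List.foldl_cons, List.length_cons]
    split
    · have := ih (s + 1); omega
    · have := ih s; omega

theorem pvScore_bounds (p : List (String × String)) : 0 ≤ pvScore p ∧ pvScore p ≤ 7 := by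
  have := pvCountBounds (PySem.Str.lower (PySem.Dict.getD ⟨p⟩ "text" "")) pvKeywords 0
  simp only [pvKeywords, List.length_cons, List.length_nil] at this
  unfold pvScore pvKeywords
  omega

-- A's accumulation loop = filter + map
theorem pvRelA_eq (l : List (List (String × String))) (acc : List (List (String × String) × Int)) :
    l.foldl (fun acc p => let score := pvScore p;
        if score > 0 then acc ++ [(p, score)] else acc) acc
    = acc ++ (l.filter (fun p => decide (0 < pvScore p))).map (fun p => (p, pvScore p)) := by
  induction l generalizing acc with
  | nil => simp
  | cons p l ih =>
    simp only [List.foldl_cons, List.filter_cons]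
    by_cases h : 0 < pvScore p
    · simp [h, ih, List.append_assoc]
    · simp [h, ih]

-- B's bucket loop = a plain grouping fold over the filtered, (score, p)-keyed list
theorem pvBucketsB_eq (l : List (List (String × String))) (d : PySem.Dict Int (List (List (String × String)))) :
    l.foldl (fun d p => let score := pvScore p;
        if score > 0 then d.modify score [] (fun l => l ++ [p]) else d) d
    = List.foldl (fun d q => d.modify q.1 [] (fun l => l ++ [q.2])) d
        ((l.filter (fun p => decide (0 < pvScore p))).map (fun p => (pvScore p, p))) := by
  induction l generalizing d with
  | nil => simp
  | cons p l ih =>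
    simp only [List.foldl_cons, List.filter_cons]
    by_cases h : 0 < pvScore p
    · simp [h, ih]
    · simp [h, ih]

-- insertBy passes unchanged over a prefix it does not go before
theorem pvInsertBy_pass {α : Type} (bf : α → α → Bool) (x : α) (A B : List α)
    (h : ∀ a ∈ A, bf x a = false) :
    PySem.List.insertBy bf x (A ++ B) = A ++ PySem.List.insertBy bf x B := by
  induction A with
  | nil => simp
  | cons a A ih =>
    have ha : bf x a = false := h a (by simp)
    simp only [List.cons_append, PySem.List.insertBy, ha, Bool.false_eq_true, if_false]
    rw [ih (fun a ha' => h a (by simp [ha']))]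

-- insertBy goes to the front of a list it goes before everywhere
theorem pvInsertBy_front {α : Type} (bf : α → α → Bool) (x : α) (R : List α)
    (h : ∀ a ∈ R, bf x a = true) :
    PySem.List.insertBy bf x R = x :: R := by
  cases R with
  | nil => simp [PySem.List.insertBy]
  | cons a R => simp [PySem.List.insertBy, h a (by simp)]

theorem pvFlatMap_congr {α β : Type} (L : List α) (f g : α → List β)
    (h : ∀ a ∈ L, f a = g a) : L.flatMap f = L.flatMap g := by
  induction L with
  | nil => simp
  | cons a L ih => simp [h a (by simp), ih (fun a ha => h a (by simp [ha]))]

-- inserting x into the bucket concatenation appends it to its own bucket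
theorem pvInsBucket {α : Type} (key : α → Int) (x : α) (L : List Int) (ys : List α)
    (hL : L.Pairwise (· > ·)) (hmem : key x ∈ L) :
    PySem.List.insertBy (fun a b => decide (key b < key a)) x
        (L.flatMap (fun s => ys.filter (fun a => key a == s)))
    = L.flatMap (fun s => (ys ++ [x]).filter (fun a => key a == s)) := by
  induction L with
  | nil => simp at hmem
  | cons s L ih =>
    have hpw : ∀ t ∈ L, t < s := by
      intro t ht; exact (List.pairwise_cons.mp hL).1 t ht
    have hkey : ∀ a ∈ ys.filter (fun a => key a == s), key a = s := by
      intro a ha; exact beq_iff_eq.mp (by simpa using (List.mem_filter.mp ha).2)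
    simp only [List.flatMap_cons]
    by_cases hx : key x = s
    · rw [pvInsertBy_pass]
      · rw [pvInsertBy_front]
        · have hrest : L.flatMap (fun t => (ys ++ [x]).filter (fun a => key a == t))
              = L.flatMap (fun t => ys.filter (fun a => key a == t)) := by
            apply pvFlatMap_congr; intro t ht
            have : (key x == t) = false := by
              have := hpw t ht; simp; omega
            simp [List.filter_append, this]
          rw [hrest, List.filter_append]
          simp [hx, List.append_assoc]
        · intro a ha
          simp only [List.mem_flatMap] at ha
          obtain ⟨t, ht, ha⟩ := ha
          have h1 : key a = t := beq_iff_eq.mp (by simpa using (List.mem_filter.mp ha).2)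
          have h2 := hpw t ht
          simp; omega
      · intro a ha
        have := hkey a ha
        simp; omega
    · have hx' : key x ∈ L := by
        cases List.mem_cons.mp hmem with
        | inl h => exact absurd h hx
        | inr h => exact h
      rw [pvInsertBy_pass]
      · rw [ih hL.of_cons hx']
        have : (key x == s) = false := by simp [hx]
        simp [List.filter_append, this]
      · intro a ha
        have h1 := hkey a ha
        have h2 : key x < s := hpw _ hx'
        simp; omega

-- stable descending sort = buckets emitted in the (strictly descending) order of L
theorem pvSortedBucket {α : Type} (key : α → Int) (xs : List α) (L : List Int)
    (hL : L.Pairwise (· > ·)) (h : ∀ x ∈ xs, key x ∈ L) :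
    PySem.List.sorted xs key true = L.flatMap (fun s => xs.filter (fun a => key a == s)) := by
  induction xs using List.reverseRecOn with
  | nil => simp [PySem.List.sorted_rev_eq_foldl_insertBy]
  | append_singleton ys x ih =>
    rw [PySem.List.sorted_rev_eq_foldl_insertBy, List.foldl_append]
    simp only [List.foldl_cons, List.foldl_nil]
    rw [← PySem.List.sorted_rev_eq_foldl_insertBy, ih (fun a ha => h a (by simp [ha]))]
    exact pvInsBucket key x L ys hL (h x (by simp))

-- a [:k] slice commutes with map
theorem pvMapSlice {α β : Type} (f : α → β) (l : List α) (b : Int) :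
    (PySem.List.slice l none (some b)).map f = PySem.List.slice (l.map f) none (some b) := by
  simp [PySem.List.slice, PySem.List.clampIdx, List.map_take]

-- ===== VERDICT (by name: the statement is the Claim_ definition above) =====
theorem find_relevant_precedents_spec : Claim_equal_find_relevant_precedents := by
  intro facts precedents top_k _
  unfold Spec_find_relevant_precedents
  unfold find_relevant_precedents find_relevant_precedents_alt
  simp only [pvRelA_eq, pvBucketsB_eq, List.nil_append]
  set F := precedents.filter (fun p => decide (0 < pvScore p)) with hF
  have hmem : ∀ x ∈ F.map (fun p => (p, pvScore p)), (fun x => x.2) x ∈ ([7,6,5,4,3,2,1] : List Int) := by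
    intro x hx
    simp only [List.mem_map] at hx
    obtain ⟨p, hp, rfl⟩ := hx
    have h1 : 0 < pvScore p := by
      have := List.of_mem_filter hp; simpa using this
    have h2 := pvScore_bounds p
    simp; omega
  have hs := pvSortedBucket (fun x : (List (String × String)) × Int => x.2)
      (F.map (fun p => (p, pvScore p))) [7,6,5,4,3,2,1] (by decide) hmem
  rw [hs]
  rw [pvMapSlice]
  congr 1
  -- both sides are the bucket concatenation over scores 7..1
  have hrange : PySem.List.pyRange 7 0 (-1) = ([7,6,5,4,3,2,1] : List Int) := by decide
  rw [hrange]
  simp only [List.foldl_cons, List.foldl_nil, List.nil_append]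
  simp only [PySem.Dict.getD_foldl_modify_append]
  simp [List.filter_map, Function.comp_def, List.map_map, List.flatMap_cons,
        List.flatMap_nil, List.append_assoc, List.append_nil, PySem.Dict.empty, PySem.Dict.getD, PySem.Dict.get?]
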